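-- pv_equiv track=rewrite | github.com/senthilkumarsomasundaraam/omsakthi-friends | myfriends.py | find_all_number_of_friends
-- ===== SOURCE A (Python) =====
-- def find_all_number_of_friends(my_dir):
--     """List every person in the directory by the number of friends each has
--
--     Returns a sorted (in decreasing order by number of friends) list
--     of 2-tuples, where each tuples has the person's name as the first element,
--     the the number of friends as the second element.
--     """
--     friends_list = []
--
--     # ------------ BEGIN YOUR CODE ------------
--     for i in my_dir:
--         host_name = i
--         friends_num = len(my_dir[i])
--         friends_list.append((host_name, friends_num))
--
--     ### First we first sort by the secondary key, the name
--     friends_list = sorted(friends_list, key=lambda i: i[0], reverse=False)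
--     ### Now we first sort by the first key, the figure
--     friends_list = sorted(friends_list, key=lambda i: i[1], reverse=True)
--
--     # ------------ END YOUR CODE ------------
--     # Reviewed, no changes, no notes
--
--     return friends_list
-- ===== SOURCE B (Python) =====
-- def find_all_number_of_friends(my_dir):
--     """List every person in the directory by the number of friends each has
--
--     Bucket the names by friend count, then emit buckets in decreasing
--     count order, names sorted ascending within each bucket.
--     """
--     buckets = {}
--     for name, friends in my_dir.items():
--         buckets.setdefault(len(friends), []).append(name)
--
--     result = []
--     for count in sorted(buckets, reverse=True):
--         for name in sorted(buckets[count]):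
--             result.append((name, count))
--     return result
-- ===== Notes on version B (the rewrite author's own statement) =====
-- stated objective: alternative
-- what changed: Replaces the global two-pass stable sort of (name, count) tuples by a one-pass grouping dict from friend-count to names, then emits the distinct counts in descending order with names sorted ascending inside each bucket.
import Mathlib
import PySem

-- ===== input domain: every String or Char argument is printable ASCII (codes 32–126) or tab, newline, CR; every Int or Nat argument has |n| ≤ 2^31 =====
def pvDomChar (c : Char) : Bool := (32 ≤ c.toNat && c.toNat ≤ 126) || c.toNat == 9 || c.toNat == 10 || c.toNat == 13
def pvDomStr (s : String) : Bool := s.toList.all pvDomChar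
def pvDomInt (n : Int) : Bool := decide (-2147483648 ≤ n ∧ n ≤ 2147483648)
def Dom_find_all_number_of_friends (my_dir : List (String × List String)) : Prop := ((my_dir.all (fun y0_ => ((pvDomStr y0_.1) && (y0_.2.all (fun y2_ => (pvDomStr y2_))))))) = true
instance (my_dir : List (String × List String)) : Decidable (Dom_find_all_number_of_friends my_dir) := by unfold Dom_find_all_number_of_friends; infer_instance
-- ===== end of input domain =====

-- B replaces A's two-pass stable sort by a count→names grouping dict emitted in descending count
-- order with names sorted ascending per bucket (alternative decomposition, same asymptotic cost).


-- ===== PORT A =====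
-- 'for i in my_dir: friends_list.append((i, len(my_dir[i])))' — my_dir[i] is the dict lookup;
-- with distinct keys (Pre_) it always succeeds, so the .getD default is never consulted.
def find_all_number_of_friends (my_dir : List (String × List String)) : List (String × Int) :=
  let friends_list : List (String × Int) :=
    my_dir.foldl (fun acc i => acc ++ [(i.1, (((my_dir.lookup i.1).getD []).length : Int))]) []
  -- first sort by the secondary key, the name
  let friends_list := PySem.List.sorted friends_list (fun i => i.1) false
  -- then sort by the primary key, the figure, descending (stable)
  PySem.List.sorted friends_list (fun i => i.2) true

-- ===== PORT B =====
def find_all_number_of_friends_alt (my_dir : List (String × List String)) : List (String × Int) :=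
  -- buckets.setdefault(len(friends), []).append(name)
  let buckets : PySem.Dict Int (List String) :=
    my_dir.foldl (fun d p => d.modify ((p.2.length : Int)) [] (fun l => l ++ [p.1])) PySem.Dict.empty
  (PySem.List.sorted buckets.keys (fun c => c) true).foldl
    (fun acc c =>
      (PySem.List.sorted (buckets.getD c []) (fun n => n) false).foldl
        (fun acc2 n => acc2 ++ [(n, c)]) acc) []

-- ===== PRECONDITION & SPEC =====
-- Pre_ excludes association lists with duplicate keys: A's argument is a Python dict, whose keys
-- are necessarily distinct, so no such list represents an actual input of A.
def Pre_find_all_number_of_friends (my_dir : List (String × List String)) : Prop :=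
  (my_dir.map (fun p => p.1)).Nodup
instance (my_dir : List (String × List String)) : Decidable (Pre_find_all_number_of_friends my_dir) := by unfold Pre_find_all_number_of_friends; infer_instance
def pvWitness_find_all_number_of_friends : (List (String × List String)) :=
  [("anna", ["bob", "carl"]), ("bob", ["anna"]), ("carl", [])]

def Spec_find_all_number_of_friends (my_dir : List (String × List String)) (out : List (String × Int)) : Prop := out = find_all_number_of_friends_alt my_dir
instance (my_dir : List (String × List String)) (out : List (String × Int)) : Decidable (Spec_find_all_number_of_friends my_dir out) := by unfold Spec_find_all_number_of_friends; infer_instance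

-- ===== CLAIM (what is proved, stated in full; the proofs are below) =====
def Claim_equal_find_all_number_of_friends : Prop := ∀ (my_dir : List (String × List String)), Dom_find_all_number_of_friends my_dir → Pre_find_all_number_of_friends my_dir → Spec_find_all_number_of_friends my_dir (find_all_number_of_friends my_dir)

-- ===== LEMMAS AND PROOFS =====

-- The strict order both outputs are arranged in: count descending, name ascending on ties.
def pvLt (a b : String × Int) : Prop := b.2 < a.2 ∨ (a.2 = b.2 ∧ a.1 < b.1)

lemma pvLt_asymm {a b : String × Int} (h1 : pvLt a b) (h2 : pvLt b a) : False := by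
  rcases h1 with h1 | ⟨h1, h1'⟩ <;> rcases h2 with h2 | ⟨h2, h2'⟩
  · omega
  · omega
  · omega
  · exact absurd h2' (lt_asymm h1')

-- a pvLt-sorted arrangement of a multiset is unique
lemma pv_unique {l₁ l₂ : List (String × Int)} (hp : l₁.Perm l₂)
    (h1 : l₁.Pairwise pvLt) (h2 : l₂.Pairwise pvLt) : l₁ = l₂ := by
  exact List.Perm.eq_of_pairwise (fun a b _ _ ha hb => absurd ha (fun ha => pvLt_asymm ha hb)) h1 h2 hp

lemma pv_lookup {my_dir : List (String × List String)}
    (hnd : (my_dir.map (fun p => p.1)).Nodup) {p : String × List String} (hp : p ∈ my_dir) :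
    my_dir.lookup p.1 = some p.2 := by
  induction my_dir with
  | nil => cases hp
  | cons q t ih =>
    simp only [List.map_cons, List.nodup_cons] at hnd
    rcases List.mem_cons.1 hp with rfl | hp'
    · simp [List.lookup]
    · have hne : q.1 ≠ p.1 := fun h => hnd.1 (h ▸ List.mem_map_of_mem hp')
      have hb : (p.1 == q.1) = false := by simpa using fun h : p.1 = q.1 => hne h.symm
      simp only [List.lookup, hb]
      exact ih hnd.2 hp'

-- stability core: inserting x (by count, descending) into a pvLt-sorted list whose
-- names all precede x's keeps the list pvLt-sorted
lemma pv_ins (x : String × Int) : ∀ (acc : List (String × Int)),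
    acc.Pairwise pvLt → (∀ y ∈ acc, y.1 < x.1) →
    (PySem.List.insertBy (fun a b => decide (b.2 < a.2)) x acc).Pairwise pvLt := by
  intro acc
  induction acc with
  | nil => intro _ _; simp [PySem.List.insertBy]
  | cons y ys ih =>
    intro hpw hn
    rw [List.pairwise_cons] at hpw
    simp only [PySem.List.insertBy]
    by_cases hb : y.2 < x.2
    · rw [if_pos (by simpa using hb)]
      refine List.pairwise_cons.2 ⟨?_, List.pairwise_cons.2 ⟨hpw.1, hpw.2⟩⟩
      intro z hz
      rcases List.mem_cons.1 hz with rfl | hz'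
      · exact Or.inl hb
      · have := hpw.1 z hz'
        rcases this with h | ⟨h, _⟩ <;> exact Or.inl (by omega)
    · rw [if_neg (by simpa using hb)]
      refine List.pairwise_cons.2 ⟨?_, ih hpw.2 (fun z hz => hn z (List.mem_cons_of_mem _ hz))⟩
      intro z hz
      rcases (PySem.List.mem_insertBy _ _ _ _).1 hz with rfl | hz'
      · rcases lt_or_eq_of_le (le_of_not_gt hb) with h | h
        · exact Or.inl h
        · exact Or.inr ⟨h.symm, hn y (List.mem_cons_self)⟩
      · exact hpw.1 z hz'

lemma pv_fold : ∀ (l acc : List (String × Int)),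
    (∀ y ∈ acc, ∀ x ∈ l, y.1 < x.1) → l.Pairwise (fun a b => a.1 < b.1) → acc.Pairwise pvLt →
    (l.foldl (fun acc x => PySem.List.insertBy (fun a b => decide (b.2 < a.2)) x acc) acc).Pairwise pvLt := by
  intro l
  induction l with
  | nil => intro acc _ _ h; simpa using h
  | cons x t ih =>
    intro acc hcross hpw hacc
    rw [List.pairwise_cons] at hpw
    simp only [List.foldl_cons]
    refine ih _ ?_ hpw.2 (pv_ins x acc hacc (fun y hy => hcross y hy x List.mem_cons_self))
    intro y hy x' hx'
    rcases (PySem.List.mem_insertBy _ _ _ _).1 hy with rfl | hy'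
    · exact hpw.1 x' hx'
    · exact hcross y hy' x' (List.mem_cons_of_mem _ hx')

-- the flatMap-of-filters over the distinct keys is a permutation of the original list
lemma pv_perm_flatMap : ∀ (ks : List Int) (l : List (String × Int)), ks.Nodup →
    (∀ x ∈ l, x.2 ∈ ks) →
    (ks.flatMap (fun c => l.filter (fun x => x.2 == c))).Perm l := by
  intro ks
  induction ks with
  | nil =>
    intro l _ h
    have : l = [] := List.eq_nil_iff_forall_not_mem.2 (fun x hx => by simpa using h x hx)
    simp [this]
  | cons k t ih =>
    intro l hnd hmem
    rw [List.nodup_cons] at hnd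
    simp only [List.flatMap_cons]
    have hflt : ∀ c ∈ t, l.filter (fun x => x.2 == c)
        = (l.filter (fun x => !(x.2 == k))).filter (fun x => x.2 == c) := by
      intro c hc
      rw [List.filter_filter]
      refine (List.filter_congr ?_).symm
      intro x _
      by_cases h : x.2 = c
      · have hck : ¬ (c = k) := fun hk => hnd.1 (hk ▸ hc)
        simp [h, hck]
      · simp [h]
    rw [List.flatMap_congr hflt]
    refine (List.Perm.append_left _ (ih _ hnd.2 ?_)).trans (List.filter_append_perm _ l)
    intro x hx
    rcases List.mem_filter.1 hx with ⟨hxl, hxk⟩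
    rcases List.mem_cons.1 (hmem x hxl) with h | h
    · exact absurd h (by simpa using hxk)
    · exact h

-- emitting strictly descending buckets of pvLt-sorted, count-constant blocks stays pvLt-sorted
lemma pv_pw_flatMap : ∀ (ks : List Int) (g : Int → List (String × Int)),
    ks.Pairwise (fun a b => b < a) →
    (∀ c, (g c).Pairwise pvLt) →
    (∀ c, ∀ x ∈ g c, x.2 = c) →
    (ks.flatMap g).Pairwise pvLt := by
  intro ks
  induction ks with
  | nil => intro g _ _ _; simp
  | cons k t ih =>
    intro g hlt hg hsnd
    rw [List.pairwise_cons] at hlt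
    rw [List.flatMap_cons, List.pairwise_append]
    refine ⟨hg k, ih g hlt.2 hg hsnd, ?_⟩
    intro x hx y hy
    rcases List.mem_flatMap.1 hy with ⟨c, hc, hyc⟩
    exact Or.inl (by rw [hsnd k x hx, hsnd c y hyc]; exact hlt.1 c hc)

-- the two programs agree on every directory with distinct names
theorem pv_main (my_dir : List (String × List String))
    (hnd : (my_dir.map (fun p => p.1)).Nodup) :
    find_all_number_of_friends my_dir = find_all_number_of_friends_alt my_dir := by
  -- the common multiset of (name, count) pairs
  set pairs : List (String × Int) := my_dir.map (fun p => (p.1, (p.2.length : Int))) with hpairs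
  have hnames : (pairs.map (fun x => x.1)).Nodup := by
    simpa [hpairs, List.map_map, Function.comp_def] using hnd
  -- ============ the A side ============
  have hA1 : my_dir.foldl (fun acc i => acc ++ [(i.1, (((my_dir.lookup i.1).getD []).length : Int))]) []
      = pairs := by
    rw [PySem.List.foldl_congr_mem my_dir _
      (fun acc i => acc ++ [(i.1, ((i.2).length : Int))]) []
      (fun acc x hx => by rw [pv_lookup hnd hx]; rfl)]
    simpa using PySem.List.foldl_append_singleton_eq_map (fun i : String × List String => (i.1, ((i.2).length : Int))) my_dir []
  set inner := PySem.List.sorted pairs (fun i => i.1) false with hinner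
  have hApw : (find_all_number_of_friends my_dir).Pairwise pvLt := by
    have hinnernd : (inner.map (fun x => x.1)).Nodup :=
      ((PySem.List.sorted_perm pairs (fun i => i.1) false).map _).nodup_iff.2 hnames
    have hlt : inner.Pairwise (fun a b => a.1 < b.1) := by
      have hle := PySem.List.sorted_pairwise pairs (fun i => i.1)
      have hne : inner.Pairwise (fun a b => a.1 ≠ b.1) := by
        rw [← List.pairwise_map (f := fun x : String × Int => x.1)]; exact hinnernd
      exact (hle.and hne).imp (fun h => lt_of_le_of_ne h.1 h.2)
    show (PySem.List.sorted (PySem.List.sorted (my_dir.foldl _ []) (fun i => i.1) false) (fun i => i.2) true).Pairwise pvLt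
    rw [hA1, ← hinner, PySem.List.sorted_rev_eq_foldl_insertBy]
    exact pv_fold inner [] (by simp) hlt (by simp)
  have hAperm : (find_all_number_of_friends my_dir).Perm pairs := by
    show (PySem.List.sorted (PySem.List.sorted (my_dir.foldl _ []) (fun i => i.1) false) (fun i => i.2) true).Perm pairs
    rw [hA1]
    exact (PySem.List.sorted_perm _ _ _).trans (PySem.List.sorted_perm _ _ _)
  -- ============ the B side ============
  set swapped : List (Int × String) := my_dir.map (fun p => ((p.2.length : Int), p.1)) with hswapped
  set buckets : PySem.Dict Int (List String) :=
    my_dir.foldl (fun d p => d.modify ((p.2.length : Int)) [] (fun l => l ++ [p.1])) PySem.Dict.empty with hbuckets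
  have hbfold : buckets = swapped.foldl (fun d q => d.modify q.1 [] (fun l => l ++ [q.2])) PySem.Dict.empty := by
    rw [hbuckets, hswapped, List.foldl_map]
  have hkeys : buckets.keys = PySem.Set.ofList (pairs.map (fun x => x.2)) := by
    rw [hbfold]
    rw [PySem.Dict.keys_foldl_modify_key swapped (fun q => q.1) [] (fun d q l => l ++ [q.2]) PySem.Dict.empty]
    rw [PySem.Dict.keys_empty, PySem.Set.update_nil_left]
    congr 1
    simp [hswapped, hpairs, List.map_map, Function.comp_def]
  have hgetD : ∀ c : Int, buckets.getD c [] = (pairs.filter (fun x => x.2 == c)).map (fun x => x.1) := by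
    intro c
    rw [hbfold, PySem.Dict.getD_foldl_modify_append]
    rw [PySem.Dict.getD_empty]
    have : swapped = pairs.map Prod.swap := by
      simp [hswapped, hpairs, List.map_map, Function.comp_def, Prod.swap]
    rw [this, List.filter_map, List.map_map]
    rfl
  set counts := PySem.List.sorted buckets.keys (fun c => c) true with hcounts
  have hBeq : find_all_number_of_friends_alt my_dir
      = counts.flatMap (fun c => (PySem.List.sorted (buckets.getD c []) (fun n => n) false).map (fun n => (n, c))) := by
    show counts.foldl (fun acc c => (PySem.List.sorted (buckets.getD c []) (fun n => n) false).foldl (fun acc2 n => acc2 ++ [(n, c)]) acc) []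
      = _
    have : ∀ (acc : List (String × Int)) (c : Int),
        (PySem.List.sorted (buckets.getD c []) (fun n => n) false).foldl (fun acc2 n => acc2 ++ [(n, c)]) acc
        = acc ++ (PySem.List.sorted (buckets.getD c []) (fun n => n) false).map (fun n => (n, c)) := by
      intro acc c; exact PySem.List.foldl_append_singleton_eq_map _ _ _
    rw [PySem.List.foldl_congr_mem counts _
      (fun acc c => acc ++ (PySem.List.sorted (buckets.getD c []) (fun n => n) false).map (fun n => (n, c))) []
      (fun acc c _ => this acc c)]
    simpa using PySem.List.foldl_append_eq_flatMap
      (fun c => (PySem.List.sorted (buckets.getD c []) (fun n => n) false).map (fun n => (n, c))) counts []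
  -- each bucket, mapped back, is the filter of pairs at that count
  have hbucketperm : ∀ c : Int,
      ((PySem.List.sorted (buckets.getD c []) (fun n => n) false).map (fun n => (n, c))).Perm
        (pairs.filter (fun x => x.2 == c)) := by
    intro c
    have h1 : ((buckets.getD c []).map (fun n => (n, c))) = pairs.filter (fun x => x.2 == c) := by
      rw [hgetD c, List.map_map]
      refine List.map_congr_left ?_ |>.trans (List.map_id _)
      intro x hx
      have : x.2 = c := by simpa using (List.mem_filter.1 hx).2
      simp [Prod.ext_iff, this]
    rw [← h1]
    exact (PySem.List.sorted_perm _ _ _).map _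
  have hcountsnd : counts.Nodup := by
    rw [hcounts]
    exact (PySem.List.sorted_perm _ _ _).nodup_iff.2 (hkeys ▸ PySem.Set.nodup_ofList _)
  have hBperm : (find_all_number_of_friends_alt my_dir).Perm pairs := by
    rw [hBeq]
    refine (List.Perm.flatMap_left counts (fun c _ => hbucketperm c)).trans ?_
    refine pv_perm_flatMap counts pairs hcountsnd ?_
    intro x hx
    rw [hcounts, PySem.List.mem_sorted, hkeys, PySem.Set.mem_ofList]
    exact List.mem_map_of_mem hx
  have hcountslt : counts.Pairwise (fun a b => b < a) := by
    have hle := PySem.List.sorted_pairwise_rev buckets.keys (fun c => c)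
    have hne : counts.Pairwise (fun a b : Int => a ≠ b) := hcountsnd
    exact (hle.and hne).imp (fun h => lt_of_le_of_ne h.1 h.2.symm)
  have hBpw : (find_all_number_of_friends_alt my_dir).Pairwise pvLt := by
    rw [hBeq]
    refine pv_pw_flatMap counts _ hcountslt ?_ ?_
    · intro c
      rw [List.pairwise_map]
      have hnamesnd : (buckets.getD c []).Nodup := by
        rw [hgetD c]
        exact ((List.filter_sublist (l := pairs)).map (fun x => x.1)).nodup hnames
      have hle := PySem.List.sorted_pairwise (buckets.getD c []) (fun n => n)
      have hne : (PySem.List.sorted (buckets.getD c []) (fun n => n) false).Pairwise (fun a b => a ≠ b) :=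
        (PySem.List.sorted_perm _ _ _).nodup_iff.2 hnamesnd
      exact (hle.and hne).imp (fun h => Or.inr ⟨rfl, lt_of_le_of_ne h.1 h.2⟩)
    · intro c x hx
      rcases List.mem_map.1 hx with ⟨n, _, rfl⟩
      rfl
  exact pv_unique (hAperm.trans hBperm.symm) hApw hBpw

-- ===== VERDICT (by name: the statement is the Claim_ definition above) =====
theorem find_all_number_of_friends_spec : Claim_equal_find_all_number_of_friends := by
  intro my_dir _ hpre
  exact pv_main my_dir hpre
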